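-- pv_equiv track=rewrite | github.com/nanaboat1/Rose | bfs.py | itr_bfs
-- ===== SOURCE A (Python) =====
-- from collections import deque
--
-- def itr_bfs(graph, start, end, path=[]) -> int:
--
--     queue = deque() # updates nodes being visited.
--     seen_node = set() # prevent's revisit of traversed nodes.
--
--     # start node is a path
--     queue.append([start])
--     seen_node.add(start)
--
--     # itr to traverse the queue.
--     while queue:
--
--         path = queue.pop()
--         vtx = path[-1]
--
--         if vtx == end: # when destination is reached
--
--             return len(path[:-1])
--
--         for node in graph.get(vtx,[]):
--
--             if node not in seen_node:
--                 seen_node.add(node)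
--                 newpath = list(path)
--                 newpath.append(node)
--                 queue.append(newpath)
-- ===== SOURCE B (Python) =====
-- def itr_bfs(graph, start, end, path=[]) -> int:
--     # Recursive depth-first search carrying the depth as a parameter:
--     # visiting a node first marks all its not-yet-seen neighbours (as A does
--     # at push time), then descends into them last-marked-first (A pops from
--     # the right), returning the first depth at which `end` is visited.
--     seen = {start}
--
--     def walk(vtx, depth):
--         if vtx == end:
--             return depth
--         kids = []
--         for n in graph.get(vtx, []):
--             if n not in seen:
--                 seen.add(n)
--                 kids.append(n)
--         for n in reversed(kids):
--             r = walk(n, depth + 1)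
--             if r is not None:
--                 return r
--         return None
--
--     return walk(start, 0)
-- ===== Notes on version B (the rewrite author's own statement) =====
-- stated objective: alternative
-- what changed: B replaces A's explicit stack of ever-growing copied path lists by a recursive depth-first walk that carries only the current depth, marking unseen neighbours before descending into them last-marked-first (A's pop order), so no path list is ever built.
import Mathlib
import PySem

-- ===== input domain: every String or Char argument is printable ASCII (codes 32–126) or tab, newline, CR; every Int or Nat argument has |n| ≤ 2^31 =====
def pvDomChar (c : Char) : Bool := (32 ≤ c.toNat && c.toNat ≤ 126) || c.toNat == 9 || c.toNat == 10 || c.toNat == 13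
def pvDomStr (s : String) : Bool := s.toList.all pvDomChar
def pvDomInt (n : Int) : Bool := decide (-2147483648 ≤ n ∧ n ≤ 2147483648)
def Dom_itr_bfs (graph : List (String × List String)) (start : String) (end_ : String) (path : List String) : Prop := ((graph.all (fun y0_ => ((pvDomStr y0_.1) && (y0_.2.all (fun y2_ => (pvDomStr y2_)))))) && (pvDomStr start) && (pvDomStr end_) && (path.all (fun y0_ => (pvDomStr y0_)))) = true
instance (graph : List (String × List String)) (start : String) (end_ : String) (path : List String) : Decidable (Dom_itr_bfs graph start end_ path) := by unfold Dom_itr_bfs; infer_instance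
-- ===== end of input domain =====

-- B replaces A's stack of copied path lists by a depth-carrying recursive DFS with the
-- same visit order; the two ports are proved to agree on every input.

-- ===== PORT A =====
-- A: stack of full paths (deque used with append/pop on the right); fuel is a
-- totality guard only (each loop iteration consumes a pop; pops are bounded by
-- 1 + total adjacency size, since every push past the first marks a fresh node seen).
def itr_bfsLoopA (graph : List (String × List String)) (end_ : String) :
    Nat → List (List String) → PySem.Set String → Option Int
  | 0, _, _ => none
  | _ + 1, [], _ => none
  | fuel + 1, path :: rest, seen =>
      match PySem.List.pyGet? path (-1) with
      | none => none   -- unreachable: every queued path is nonempty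
      | some vtx =>
        if vtx == end_ then
          some ((PySem.List.slice path none (some (-1))).length : Int)
        else
          let st := ((List.lookup vtx graph).getD []).foldl
            (fun (qs : List (List String) × PySem.Set String) node =>
              if PySem.Set.contains qs.2 node then qs
              else ((path ++ [node]) :: qs.1, PySem.Set.add qs.2 node)) (rest, seen)
          itr_bfsLoopA graph end_ fuel st.1 st.2

def itr_bfs (graph : List (String × List String)) (start : String) (end_ : String) (path : List String) : Option Int :=
  itr_bfsLoopA graph end_ (graph.foldl (fun a p => a + p.2.length) 0 + 2)
    [[start]] (PySem.Set.add PySem.Set.empty start)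

-- ===== PORT B =====
-- B: the inner 'collect the not-yet-seen neighbours, marking them' loop of walk.
def itr_bfsCollect : List String → PySem.Set String → List String × PySem.Set String
  | [], seen => ([], seen)
  | n :: ns, seen =>
      if PySem.Set.contains seen n then itr_bfsCollect ns seen
      else
        let r := itr_bfsCollect ns (PySem.Set.add seen n)
        (n :: r.1, r.2)

-- B: the recursive walk (one fuel unit per node visit — a totality guard only, visits
-- are bounded as for A), threading the seen set and the remaining fuel through the
-- calls; itr_bfsWalkKids is the 'for n in reversed(kids): r = walk(n, depth + 1);
-- if r is not None: return r' loop ('min f fuel' only justifies termination: f ≤ fuel).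
mutual
def itr_bfsWalk (graph : List (String × List String)) (end_ : String) :
    Nat → String → Int → PySem.Set String → Option Int × PySem.Set String × Nat
  | 0, _, _, seen => (none, seen, 0)
  | fuel + 1, vtx, depth, seen =>
      if vtx == end_ then (some depth, seen, fuel + 1)
      else
        let c := itr_bfsCollect ((List.lookup vtx graph).getD []) seen
        itr_bfsWalkKids graph end_ fuel c.1.reverse (depth + 1) c.2
  termination_by fuel _ _ _ => (fuel, 0)
  decreasing_by exact Prod.Lex.left _ _ (Nat.lt_succ_self _)

def itr_bfsWalkKids (graph : List (String × List String)) (end_ : String) :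
    Nat → List String → Int → PySem.Set String → Option Int × PySem.Set String × Nat
  | fuel, [], _, seen => (none, seen, fuel)
  | fuel, n :: ns, depth, seen =>
      match itr_bfsWalk graph end_ fuel n depth seen with
      | (some r, s, f) => (some r, s, f)
      | (none, s, f) => itr_bfsWalkKids graph end_ (min f fuel) ns depth s
  termination_by fuel ns _ _ => (fuel, ns.length + 1)
  decreasing_by
    · exact Prod.Lex.right _ (Nat.zero_lt_succ _)
    · rcases Nat.lt_or_ge (min f fuel) fuel with h | h
      · exact Prod.Lex.left _ _ h
      · have hm : min f fuel = fuel := Nat.le_antisymm (Nat.min_le_right _ _) h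
        rw [hm]; exact Prod.Lex.right _ (Nat.lt_succ_self _)
end

def itr_bfs_alt (graph : List (String × List String)) (start : String) (end_ : String) (path : List String) : Option Int :=
  (itr_bfsWalk graph end_ (graph.foldl (fun a p => a + p.2.length) 0 + 2)
    start 0 (PySem.Set.add PySem.Set.empty start)).1

-- ===== PRECONDITION & SPEC =====
def Spec_itr_bfs (graph : List (String × List String)) (start : String) (end_ : String) (path : List String) (out : Option Int) : Prop := out = itr_bfs_alt graph start end_ path
instance (graph : List (String × List String)) (start : String) (end_ : String) (path : List String) (out : Option Int) : Decidable (Spec_itr_bfs graph start end_ path out) := by unfold Spec_itr_bfs; infer_instance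

-- ===== CLAIM (what is proved, stated in full; the proofs are below) =====
def Claim_equal_itr_bfs : Prop := ∀ (graph : List (String × List String)) (start : String) (end_ : String) (path : List String), Dom_itr_bfs graph start end_ path → Spec_itr_bfs graph start end_ path (itr_bfs graph start end_ path)

-- ===== LEMMAS AND PROOFS =====

-- Proof-only intermediate machine: A's stack machine with each queued path abstracted
-- to its (endpoint, depth) pair.
def pvLoopP (graph : List (String × List String)) (end_ : String) :
    Nat → List (String × Int) → PySem.Set String → Option Int
  | 0, _, _ => none
  | _ + 1, [], _ => none
  | fuel + 1, (vtx, depth) :: rest, seen =>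
      if vtx == end_ then some depth
      else
        let st := ((List.lookup vtx graph).getD []).foldl
          (fun (qs : List (String × Int) × PySem.Set String) node =>
            if PySem.Set.contains qs.2 node then qs
            else ((node, depth + 1) :: qs.1, PySem.Set.add qs.2 node)) (rest, seen)
        pvLoopP graph end_ fuel st.1 st.2

/-- Abstraction of a queued path to its (endpoint, depth) pair. -/
def pvAbs (p : List String) : String × Int := (p.getLast?.getD "", (p.length : Int) - 1)

theorem pvFoldStep (graph : List (String × List String)) (path : List String)
    (hne : path ≠ []) (nbrs : List String) :
    ∀ (rest : List (List String)) (seen : PySem.Set String),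
    (∀ p ∈ rest, p ≠ []) →
    (let rA := nbrs.foldl
        (fun (qs : List (List String) × PySem.Set String) node =>
          if PySem.Set.contains qs.2 node then qs
          else ((path ++ [node]) :: qs.1, PySem.Set.add qs.2 node)) (rest, seen)
     let rB := nbrs.foldl
        (fun (qs : List (String × Int) × PySem.Set String) node =>
          if PySem.Set.contains qs.2 node then qs
          else ((node, ((path.length : Int) - 1) + 1) :: qs.1, PySem.Set.add qs.2 node))
        (rest.map pvAbs, seen)
     rA.1.map pvAbs = rB.1 ∧ rA.2 = rB.2 ∧ ∀ p ∈ rA.1, p ≠ []) := by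
  induction nbrs with
  | nil => intro rest seen hr; exact ⟨rfl, rfl, hr⟩
  | cons n ns ih =>
    intro rest seen hr
    simp only [List.foldl_cons]
    by_cases hc : PySem.Set.contains seen n = true
    · simp only [hc, if_true]; exact ih rest seen hr
    · simp only [hc]
      have hr' : ∀ p ∈ (path ++ [n]) :: rest, p ≠ [] := by
        intro p hp
        rcases List.mem_cons.mp hp with h | h
        · subst h; simp
        · exact hr p h
      have := ih ((path ++ [n]) :: rest) (PySem.Set.add seen n) hr'
      have habs : pvAbs (path ++ [n]) = (n, ((path.length : Int) - 1) + 1) := by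
        simp [pvAbs]
      simpa [habs] using this

theorem pvLoopAP (graph : List (String × List String)) (end_ : String) :
    ∀ (fuel : Nat) (qA : List (List String)) (seen : PySem.Set String),
    (∀ p ∈ qA, p ≠ []) →
    itr_bfsLoopA graph end_ fuel qA seen = pvLoopP graph end_ fuel (qA.map pvAbs) seen := by
  intro fuel
  induction fuel with
  | zero => intro qA seen _; cases qA <;> rfl
  | succ fuel ih =>
    intro qA seen hne
    cases qA with
    | nil => rfl
    | cons path rest =>
      have hp : path ≠ [] := hne path (by simp)
      have hvtx : PySem.List.pyGet? path (-1) = some (path.getLast?.getD "") := by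
        rw [PySem.List.pyGet?_neg_one]
        cases h : path.getLast? with
        | none => exact absurd (List.getLast?_eq_none_iff.mp h) hp
        | some v => rfl
      have hlen : 1 ≤ path.length := List.length_pos_iff.mpr hp
      show itr_bfsLoopA graph end_ (fuel + 1) (path :: rest) seen
          = pvLoopP graph end_ (fuel + 1) (pvAbs path :: rest.map pvAbs) seen
      rw [itr_bfsLoopA, hvtx]
      rw [show pvAbs path = (path.getLast?.getD "", (path.length : Int) - 1) from rfl]
      rw [pvLoopP]
      by_cases he : (path.getLast?.getD "" == end_) = true
      · simp only [he, if_true]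
        congr 1
        rw [PySem.List.slice_to_neg_one]
        simp only [List.length_dropLast]
        omega
      · simp only [he]
        obtain ⟨h1, h2, h3⟩ := pvFoldStep graph path hp
          ((List.lookup (path.getLast?.getD "") graph).getD []) rest seen
          (fun p hp' => hne p (List.mem_cons_of_mem _ hp'))
        rw [ih _ _ h3, h1, h2]
        simp

-- The pair-machine's push fold, characterised through itr_bfsCollect.
theorem pvFoldCollect (d : Int) (nbrs : List String) :
    ∀ (rest : List (String × Int)) (seen : PySem.Set String),
    nbrs.foldl
      (fun (qs : List (String × Int) × PySem.Set String) node =>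
        if PySem.Set.contains qs.2 node then qs
        else ((node, d) :: qs.1, PySem.Set.add qs.2 node)) (rest, seen)
    = ((itr_bfsCollect nbrs seen).1.reverse.map (fun n => (n, d)) ++ rest,
       (itr_bfsCollect nbrs seen).2) := by
  induction nbrs with
  | nil => intro rest seen; simp [itr_bfsCollect]
  | cons n ns ih =>
    intro rest seen
    simp only [List.foldl_cons, itr_bfsCollect]
    by_cases hc : PySem.Set.contains seen n = true
    · simp only [hc, if_true]; exact ih rest seen
    · simp only [hc, Bool.false_eq_true, if_false]
      rw [ih ((n, d) :: rest) (PySem.Set.add seen n)]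
      simp

-- Leftover fuel never exceeds the fuel supplied.
theorem pvFuelLe (graph : List (String × List String)) (end_ : String) :
    ∀ fuel : Nat,
      (∀ v d s, (itr_bfsWalk graph end_ fuel v d s).2.2 ≤ fuel) ∧
      (∀ ks d s, (itr_bfsWalkKids graph end_ fuel ks d s).2.2 ≤ fuel) := by
  intro fuel
  induction fuel using Nat.strong_induction_on with
  | _ fuel ih =>
    have hw : ∀ v d s, (itr_bfsWalk graph end_ fuel v d s).2.2 ≤ fuel := by
      intro v d s
      match fuel with
      | 0 => simp [itr_bfsWalk]
      | g + 1 =>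
        rw [itr_bfsWalk]
        by_cases he : (v == end_) = true
        · simp [he]
        · simp only [he, Bool.false_eq_true, if_false]
          exact le_trans ((ih g (Nat.lt_succ_self g)).2 _ _ _) (Nat.le_succ g)
    refine ⟨hw, ?_⟩
    intro ks
    induction ks with
    | nil => intro d s; simp [itr_bfsWalkKids]
    | cons n ns ihk =>
      intro d s
      rw [itr_bfsWalkKids]
      cases hwk : itr_bfsWalk graph end_ fuel n d s with
      | mk r sf =>
        cases r with
        | some x =>
          have h := hw n d s
          rw [hwk] at h
          simpa using h
        | none =>
          simp only
          rcases Nat.lt_or_ge (min sf.2 fuel) fuel with h | h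
          · exact le_trans ((ih _ h).2 ns d sf.1) (Nat.le_of_lt h)
          · have hm : min sf.2 fuel = fuel := Nat.le_antisymm (Nat.min_le_right _ _) h
            rw [hm]; exact ihk d sf.1

-- kids at fuel 0 does nothing.
theorem pvKidsZero (graph : List (String × List String)) (end_ : String) :
    ∀ (ks : List String) (d : Int) (s : PySem.Set String),
    itr_bfsWalkKids graph end_ 0 ks d s = (none, s, 0) := by
  intro ks
  induction ks with
  | nil => intro d s; rw [itr_bfsWalkKids]
  | cons n ns ih =>
    intro d s
    rw [itr_bfsWalkKids, itr_bfsWalk]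
    simpa using ih d s

-- Main correspondence: the pair machine on a block of same-depth nodes followed by a
-- continuation stack equals the recursive walk over that block, the leftover fuel and
-- seen set resuming the continuation.
theorem pvMachineWalk (graph : List (String × List String)) (end_ : String) :
    ∀ (fuel : Nat) (ks : List String) (d : Int) (rest : List (String × Int))
      (s : PySem.Set String),
    pvLoopP graph end_ fuel (ks.map (fun n => (n, d)) ++ rest) s
      = (match itr_bfsWalkKids graph end_ fuel ks d s with
         | (some r, _, _) => some r
         | (none, s', f') => pvLoopP graph end_ f' rest s') := by
  intro fuel
  induction fuel using Nat.strong_induction_on with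
  | _ fuel ih =>
    intro ks d rest s
    cases ks with
    | nil => simp [itr_bfsWalkKids]
    | cons n ks =>
      match fuel with
      | 0 =>
        rw [pvKidsZero]
        rfl
      | g + 1 =>
        simp only [List.map_cons, List.cons_append]
        rw [pvLoopP, itr_bfsWalkKids]
        by_cases he : (n == end_) = true
        · rw [itr_bfsWalk]
          simp [he]
        · rw [itr_bfsWalk]
          simp only [he, Bool.false_eq_true, if_false]
          rw [pvFoldCollect]
          simp only
          have hlen := (pvFuelLe graph end_ g).2
            ((itr_bfsCollect ((List.lookup n graph).getD []) s).1.reverse) (d + 1)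
            ((itr_bfsCollect ((List.lookup n graph).getD []) s).2)
          have hstep := ih g (Nat.lt_succ_self g)
            ((itr_bfsCollect ((List.lookup n graph).getD []) s).1.reverse) (d + 1)
            (ks.map (fun m => (m, d)) ++ rest)
            ((itr_bfsCollect ((List.lookup n graph).getD []) s).2)
          cases hwk : itr_bfsWalkKids graph end_ g
              ((itr_bfsCollect ((List.lookup n graph).getD []) s).1.reverse) (d + 1)
              ((itr_bfsCollect ((List.lookup n graph).getD []) s).2) with
          | mk r sf =>
            cases sf with
            | mk s2 f2 =>
              rw [hwk] at hlen hstep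
              simp only at hlen
              rw [hstep]
              cases r with
              | some x => rfl
              | none =>
                simp only
                have hm : min f2 (g + 1) = f2 :=
                  Nat.min_eq_left (le_trans hlen (Nat.le_succ g))
                rw [hm]
                exact ih f2 (Nat.lt_succ_of_le hlen) ks d rest s2

-- The pair machine on the empty stack returns none at every fuel.
theorem pvLoopPNil (graph : List (String × List String)) (end_ : String) :
    ∀ (f : Nat) (s : PySem.Set String), pvLoopP graph end_ f [] s = none := by
  intro f s; cases f <;> rfl

-- ===== VERDICT (by name: the statement is the Claim_ definition above) =====
theorem itr_bfs_spec : Claim_equal_itr_bfs := by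
  intro graph start end_ path _
  unfold Spec_itr_bfs itr_bfs itr_bfs_alt
  rw [pvLoopAP graph end_ _ [[start]] _ (by simp)]
  have h := pvMachineWalk graph end_ (graph.foldl (fun a p => a + p.2.length) 0 + 2)
    [start] 0 [] (PySem.Set.add PySem.Set.empty start)
  simp only [List.map_cons, List.map_nil, List.append_nil] at h
  rw [show ([[start]].map pvAbs) = [(start, 0)] by simp [pvAbs]]
  rw [h, itr_bfsWalkKids]
  cases hwk : itr_bfsWalk graph end_ (graph.foldl (fun a p => a + p.2.length) 0 + 2)
      start 0 (PySem.Set.add PySem.Set.empty start) with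
  | mk r sf =>
    cases sf with
    | mk s2 f2 =>
      cases r with
      | some x => rfl
      | none =>
        simp only
        rw [itr_bfsWalkKids]
        simp [pvLoopPNil]
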